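-- pv_equiv track=rewrite | github.com/gradiuscypher/advent-of-code | 2021/03/python/03-solution.py | calculate_gamma
-- ===== SOURCE A (Python) =====
-- def calculate_gamma(input_list):
--     bin_str = ""
--     index = 0
--
--     for i in range(0, len(input_list[0])):
--         zcount = 0
--         ocount = 0
--
--         for instr in input_list:
--             if instr[i] == '0':
--                 zcount += 1
--             elif instr[i] == '1':
--                 ocount += 1
--
--         # find which one to add
--         if zcount > ocount:
--             bin_str += '0'
--         else:
--             bin_str += '1'
--     return bin_str
-- ===== SOURCE B (Python) =====
-- def calculate_gamma(input_list):
--     width = len(input_list[0])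
--     counts = [0] * width
--     for instr in input_list:
--         for i in range(width):
--             if instr[i] == '1':
--                 counts[i] += 1
--             elif instr[i] == '0':
--                 counts[i] -= 1
--     out = []
--     for c in counts:
--         out.append('0' if c < 0 else '1')
--     return ''.join(out)
-- ===== Notes on version B (the rewrite author's own statement) =====
-- stated objective: alternative
-- what changed: Replaces the column-major nested scan with per-column zero/one counters by a single row-major pass maintaining one whole-width net tally array (+1 for '1', -1 for '0'), then emits '0' exactly where the net tally is negative.
import Mathlib
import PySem

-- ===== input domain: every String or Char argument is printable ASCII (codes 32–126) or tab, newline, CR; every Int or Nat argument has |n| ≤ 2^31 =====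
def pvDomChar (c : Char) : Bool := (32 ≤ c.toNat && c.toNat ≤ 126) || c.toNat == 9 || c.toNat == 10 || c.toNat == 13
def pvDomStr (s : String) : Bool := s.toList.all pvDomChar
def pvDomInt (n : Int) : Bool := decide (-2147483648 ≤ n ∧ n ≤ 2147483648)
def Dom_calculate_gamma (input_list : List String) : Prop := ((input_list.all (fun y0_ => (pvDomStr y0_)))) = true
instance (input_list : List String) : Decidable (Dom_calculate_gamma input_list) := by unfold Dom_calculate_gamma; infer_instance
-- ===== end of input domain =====

-- B replaces A's column-major nested counting by a row-major pass over one net-tally array (alternative decomposition, same cost).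

-- ===== PORT A =====
-- A's inner loop: accumulate (zcount, ocount) for column i over the rows
def pvPairStep (i : Nat) (p : Int × Int) (instr : String) : Int × Int :=
  if PySem.Str.pyGet? instr (i : Int) = some '0' then (p.1 + 1, p.2)
  else if PySem.Str.pyGet? instr (i : Int) = some '1' then (p.1, p.2 + 1)
  else p

def calculate_gamma (input_list : List String) : String :=
  let width := (input_list.headD "").toList.length
  (List.range width).foldl (fun bin_str i =>
    let zo := input_list.foldl (pvPairStep i) ((0 : Int), (0 : Int))
    if zo.1 > zo.2 then bin_str ++ "0" else bin_str ++ "1") ""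

-- ===== PORT B =====
-- B's inner loop body: adjust the net tally at column i for one row
def pvStepB (instr : String) (c : List Int) (i : Nat) : List Int :=
  if PySem.Str.pyGet? instr (i : Int) = some '1' then c.set i (c.getD i 0 + 1)
  else if PySem.Str.pyGet? instr (i : Int) = some '0' then c.set i (c.getD i 0 - 1)
  else c

def calculate_gamma_alt (input_list : List String) : String :=
  let width := (input_list.headD "").toList.length
  let counts := input_list.foldl
    (fun counts instr => (List.range width).foldl (pvStepB instr) counts)
    (List.replicate width (0 : Int))
  counts.foldl (fun s c => if c < 0 then s ++ "0" else s ++ "1") ""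

-- ===== PRECONDITION & SPEC =====
-- Pre_ excludes exactly the inputs where Python A raises IndexError: the empty
-- list (input_list[0]) and lists containing a string shorter than the first one
-- (instr[i]); B raises IndexError on exactly the same inputs.
def Pre_calculate_gamma (input_list : List String) : Prop :=
  input_list ≠ [] ∧
  ∀ s ∈ input_list, (input_list.headD "").toList.length ≤ s.toList.length

instance (input_list : List String) : Decidable (Pre_calculate_gamma input_list) := by
  unfold Pre_calculate_gamma; infer_instance

def pvWitness_calculate_gamma : List String := ["011", "101", "111"]

def Spec_calculate_gamma (input_list : List String) (out : String) : Prop := out = calculate_gamma_alt input_list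
instance (input_list : List String) (out : String) : Decidable (Spec_calculate_gamma input_list out) := by unfold Spec_calculate_gamma; infer_instance

-- ===== CLAIM (what is proved, stated in full; the proofs are below) =====
def Claim_equal_calculate_gamma : Prop := ∀ (input_list : List String), Dom_calculate_gamma input_list → Pre_calculate_gamma input_list → Spec_calculate_gamma input_list (calculate_gamma input_list)

-- ===== LEMMAS AND PROOFS =====

-- net tally contributed by one row at column i ( +1 for '1', -1 for '0', else 0 )
def pvDelta (instr : String) (i : Nat) : Int :=
  if PySem.Str.pyGet? instr (i : Int) = some '1' then 1
  else if PySem.Str.pyGet? instr (i : Int) = some '0' then -1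
  else 0

-- total net tally of column i
def pvNet (l : List String) (i : Nat) : Int := (l.map (fun s => pvDelta s i)).sum

theorem pvNet_cons (s : String) (t : List String) (i : Nat) :
    pvNet (s :: t) i = pvDelta s i + pvNet t i := by
  simp [pvNet]

theorem pvPair_diff (i : Nat) : ∀ (l : List String) (p : Int × Int),
    (l.foldl (pvPairStep i) p).2 - (l.foldl (pvPairStep i) p).1 = p.2 - p.1 + pvNet l i := by
  intro l
  induction l with
  | nil => intro p; simp [pvNet]
  | cons s t ih =>
    intro p
    simp only [List.foldl_cons, pvPairStep]
    split_ifs with h0 h1 <;> rw [ih, pvNet_cons] <;> unfold pvDelta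
    · rw [h0, if_neg (by decide), if_pos rfl]; omega
    · rw [h1, if_pos rfl]; omega
    · rw [if_neg h1, if_neg h0]; omega

theorem pvInner_length (instr : String) : ∀ (is : List Nat) (c : List Int),
    (is.foldl (pvStepB instr) c).length = c.length := by
  intro is
  induction is with
  | nil => intro c; rfl
  | cons i t ih =>
    intro c
    simp only [List.foldl_cons, ih]
    unfold pvStepB
    split_ifs <;> simp

theorem pvInner_untouched (instr : String) : ∀ (is : List Nat) (c : List Int) (j : Nat),
    j ∉ is → (is.foldl (pvStepB instr) c).getD j 0 = c.getD j 0 := by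
  intro is
  induction is with
  | nil => intro c j _; rfl
  | cons i t ih =>
    intro c j hj
    simp only [List.mem_cons, not_or] at hj
    rw [List.foldl_cons, ih _ _ hj.2]
    unfold pvStepB
    split_ifs <;>
      simp [List.getD_eq_getElem?_getD, List.getElem?_set_ne (Ne.symm hj.1)]

theorem pvInner_hit (instr : String) : ∀ (is : List Nat), is.Nodup →
    ∀ (c : List Int) (j : Nat), j ∈ is → j < c.length →
    (is.foldl (pvStepB instr) c).getD j 0 = c.getD j 0 + pvDelta instr j := by
  intro is
  induction is with
  | nil => intro _ c j hj; simp at hj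
  | cons i t ih =>
    intro hnd c j hj hlen
    rcases List.nodup_cons.mp hnd with ⟨hi, hndt⟩
    simp only [List.foldl_cons]
    rcases List.mem_cons.mp hj with rfl | hjt
    · -- j = i : the head step hits j, the tail never touches it again
      rw [pvInner_untouched instr t _ _ hi]
      unfold pvStepB pvDelta
      split_ifs <;>
        simp [List.getD_eq_getElem?_getD, hlen]; try omega
    · -- j ∈ t, i ≠ j : head step leaves j alone
      have hij : i ≠ j := fun h => hi (h ▸ hjt)
      have hlen' : j < (pvStepB instr c i).length := by
        unfold pvStepB; split_ifs <;> simpa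
      rw [ih hndt _ _ hjt hlen']
      unfold pvStepB
      split_ifs <;>
        simp [List.getD_eq_getElem?_getD, List.getElem?_set_ne hij]

theorem pvOuter_length (w : Nat) : ∀ (l : List String) (c : List Int),
    (l.foldl (fun c instr => (List.range w).foldl (pvStepB instr) c) c).length = c.length := by
  intro l
  induction l with
  | nil => intro c; rfl
  | cons s t ih => intro c; simp only [List.foldl_cons, ih, pvInner_length]

theorem pvOuter_val (w : Nat) : ∀ (l : List String) (c : List Int), c.length = w →
    ∀ j < w, (l.foldl (fun c instr => (List.range w).foldl (pvStepB instr) c) c).getD j 0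
      = c.getD j 0 + pvNet l j := by
  intro l
  induction l with
  | nil => intro c _ j _; simp [pvNet]
  | cons s t ih =>
    intro c hc j hj
    simp only [List.foldl_cons]
    have hlen : ((List.range w).foldl (pvStepB s) c).length = w := by
      rw [pvInner_length]; exact hc
    rw [ih _ hlen j hj,
        pvInner_hit s (List.range w) (List.nodup_range) c j (List.mem_range.mpr hj) (hc ▸ hj)]
    have hnet : pvNet (s :: t) j = pvDelta s j + pvNet t j := by simp [pvNet]
    rw [hnet]; ring

theorem pvCounts_eq (input_list : List String) (w : Nat) :
    input_list.foldl (fun c instr => (List.range w).foldl (pvStepB instr) c)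
      (List.replicate w (0 : Int))
    = (List.range w).map (fun j => pvNet input_list j) := by
  apply List.ext_getElem
  · rw [pvOuter_length]; simp
  · intro j h1 h2
    have hjw : j < w := by simpa using h2
    have hv := pvOuter_val w input_list (List.replicate w 0) (by simp) j hjw
    rw [List.getD_eq_getElem _ _ h1] at hv
    rw [hv]
    simp [hjw]

-- ===== VERDICT (by name: the statement is the Claim_ definition above) =====
theorem calculate_gamma_spec : Claim_equal_calculate_gamma := by
  intro input_list _ _
  simp only [Spec_calculate_gamma, calculate_gamma, calculate_gamma_alt, pvCounts_eq,
    List.foldl_map]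
  apply PySem.List.foldl_congr_mem
  intro s i _
  have h := pvPair_diff i input_list ((0 : Int), (0 : Int))
  have hiff : ((input_list.foldl (pvPairStep i) ((0 : Int), (0 : Int))).1 >
      (input_list.foldl (pvPairStep i) ((0 : Int), (0 : Int))).2) ↔ pvNet input_list i < 0 := by
    omega
  by_cases hc : pvNet input_list i < 0
  · rw [if_pos (hiff.mpr hc), if_pos hc]
  · rw [if_neg (fun hh => hc (hiff.mp hh)), if_neg hc]
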